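-- pv_equiv track=rewrite | github.com/hong0708/algorithm | 프로그래머스_1/이진변환반복하기.py | solution
-- ===== SOURCE A (Python) =====
-- def solution(s):
--     answer=[]
--     count = 0
--     play = 0
--     while len(s) != 1:
--         play += 1
--         while s.count('0'):
--             count += s.count("0")
--             sub = s.replace('0', '')
--             s = sub
--         a = bin(len(s))
--         s = a[2:]
--     answer.append(play)
--     answer.append(count)
--     return answer
-- ===== SOURCE B (Python) =====
-- def _pop(n):
--     c = 0
--     while n:
--         c += n & 1
--         n >>= 1
--     return c
--
--
-- def solution(s):
--     if len(s) == 1: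
--         return [0, 0]
--     zeros = s.count('0')
--     n = len(s) - zeros        # characters kept by the first conversion
--     play, count = 1, zeros
--     while n > 1:
--         play += 1
--         count += n.bit_length() - _pop(n)
--         n = _pop(n)
--     return [play, count]
-- ===== Notes on version B (the rewrite author's own statement) =====
-- stated objective: alternative
-- what changed: B removes A's inner zero-stripping while/replace loop and its repeated binary-string building: after one pass counting the zero characters it iterates purely on integers, replacing the zeros-removed count by bit_length minus popcount and the next string by the popcount itself.
import Mathlib
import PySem

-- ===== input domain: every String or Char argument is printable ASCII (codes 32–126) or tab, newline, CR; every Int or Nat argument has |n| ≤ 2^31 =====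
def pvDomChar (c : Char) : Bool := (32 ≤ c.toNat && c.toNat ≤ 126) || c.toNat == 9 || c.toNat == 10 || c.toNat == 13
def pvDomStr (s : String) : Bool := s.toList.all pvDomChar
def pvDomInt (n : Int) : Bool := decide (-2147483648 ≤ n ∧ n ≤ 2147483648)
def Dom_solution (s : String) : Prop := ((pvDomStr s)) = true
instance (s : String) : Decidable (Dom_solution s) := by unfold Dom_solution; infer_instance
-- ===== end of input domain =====

-- B replaces A's inner zero-stripping while/replace loop and repeated binary-string rebuilding
-- by integer arithmetic (bit_length / popcount) after one counting pass; objective: alternative/simpler.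

-- ===== PORT A =====
-- bin(n)[2:] for a Nat: binAux builds the digits of a positive number, pyBin handles 0 → "0".
def binAux : Nat → List Char
  | 0 => []
  | n+1 => binAux ((n+1)/2) ++ [if (n+1) % 2 = 1 then '1' else '0']

def pyBin (n : Nat) : List Char := if n = 0 then ['0'] else binAux n

-- inner loop: `while s.count('0'): count += s.count("0"); s = s.replace('0','')`
-- (s.count('0') on chars = List.count '0'; s.replace('0','') on chars = filter (≠ '0'); exact)
def innerA (l : List Char) (count : Int) : List Char × Int :=
  if l.count '0' ≠ 0 then
    innerA (l.filter (fun c => !(c == '0'))) (count + (l.count '0' : Int))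
  else (l, count)
termination_by l.count '0'
decreasing_by
  rename_i h
  refine Nat.lt_of_le_of_lt (Nat.le_of_eq (List.count_eq_zero.mpr ?_)) (Nat.pos_of_ne_zero h)
  intro hm
  obtain ⟨h2, hmem⟩ := List.mem_unattach.mp hm
  have := (List.mem_filter.mp hmem).2
  simp at this

-- one-unfold characterization when there is nothing to strip
theorem innerA_zero (l : List Char) (count : Int) (h : l.count '0' = 0) :
    innerA l count = (l, count) := by
  rw [innerA]; simp [h]

-- characterization of the inner loop (cited by loopA's termination proof)
theorem innerA_eq (l : List Char) (count : Int) :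
    innerA l count = (l.filter (fun c => !(c == '0')), count + (l.count '0' : Int)) := by
  by_cases h : l.count '0' = 0
  · have hf : l.filter (fun c => !(c == '0')) = l := by
      refine List.filter_eq_self.mpr ?_
      intro c hc
      simp only [Bool.not_eq_eq_eq_not, Bool.not_true, beq_eq_false_iff_ne]
      intro hc0; subst hc0
      exact absurd hc (List.count_eq_zero.mp h)
    rw [innerA_zero l count h, hf, h]; simp
  · rw [innerA]
    have h0 : (l.filter (fun c => !(c == '0'))).count '0' = 0 := by
      refine List.count_eq_zero.mpr ?_
      intro hm
      have := (List.mem_filter.mp hm).2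
      simp at this
    rw [if_pos (by omega : l.count '0' ≠ 0), innerA_zero _ _ h0]

-- (l.filter p).length as a countP, cited by loopA's termination proof
theorem lengthFilter {α : Type} (p : α → Bool) (l : List α) :
    (l.filter p).length = l.countP p := List.countP_eq_length_filter.symm

-- the digit-append unfolding of binAux on a positive argument
theorem binAux_succ (n : Nat) :
    binAux (n+1) = binAux ((n+1)/2) ++ [if (n+1) % 2 = 1 then '1' else '0'] := by
  rw [binAux]

theorem binAux_length_succ (n : Nat) (h : 1 ≤ n) :
    (binAux n).length = (binAux (n/2)).length + 1 := by
  obtain ⟨m, rfl⟩ : ∃ m, n = m + 1 := ⟨n - 1, by omega⟩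
  rw [binAux_succ]; simp

-- length bounds on binAux, cited by loopA's termination proof
theorem binAux_length_le : ∀ n, 1 ≤ n → (binAux n).length ≤ n := by
  intro n
  induction n using Nat.strong_induction_on with
  | _ n ih =>
    intro h1
    rw [binAux_length_succ n h1]
    rcases Nat.eq_zero_or_pos (n/2) with h0 | hp
    · rw [h0]; simp [binAux]; omega
    · have := ih (n/2) (by omega) hp
      omega

theorem binAux_length_lt (n : Nat) (h : 3 ≤ n) : (binAux n).length < n := by
  rw [binAux_length_succ n (by omega)]
  have := binAux_length_le (n/2) (by omega)
  omega

theorem binAux_length_pos (n : Nat) (h : 1 ≤ n) : 1 ≤ (binAux n).length := by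
  rw [binAux_length_succ n h]; omega

theorem binAux_zero : binAux 0 = [] := by rw [binAux]

theorem binAux_one : binAux 1 = ['1'] := by
  have h := binAux_succ 0
  norm_num at h
  rw [h, binAux_zero]; rfl

theorem binAux_two : binAux 2 = ['1', '0'] := by
  have h := binAux_succ 1
  norm_num at h
  rw [h, binAux_one]; rfl

-- outer loop of A; measure: (length padded at 0, count of non-'0' chars) lexicographically
def loopA (l : List Char) (play count : Int) : List Int :=
  if l.length ≠ 1 then
    let r := innerA l count
    loopA (pyBin r.1.length) (play + 1) r.2
  else [play, count]
termination_by ((if l.length = 0 then 2 else l.length), l.countP (fun c => !(c == '0')))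
decreasing_by
  rw [innerA_eq]
  simp only [lengthFilter]
  set m := l.countP (fun c => !(c == '0')) with hm
  have hmle : m ≤ l.length := List.countP_le_length
  have hne : l.length ≠ 1 := by assumption
  rcases Nat.eq_zero_or_pos m with h0 | hpos
  · -- nothing survives the strip: pyBin 0 = "0" of length 1
    have hpb0 : pyBin 0 = ['0'] := rfl
    rw [h0, hpb0]
    have h1 : (['0'] : List Char).length = 1 := rfl
    rw [h1, if_neg (by omega : ¬(1:Nat) = 0)]
    rcases Nat.eq_zero_or_pos l.length with hl0 | hl1
    · rw [hl0, if_pos rfl]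
      exact Prod.Lex.left _ _ (by omega)
    · rw [if_neg (by omega : ¬l.length = 0)]
      exact Prod.Lex.left _ _ (by omega)
  · have hl2 : 2 ≤ l.length := by omega
    have hpbm : pyBin m = binAux m := by unfold pyBin; rw [if_neg (by omega : ¬m = 0)]
    rw [hpbm]
    have hble : (binAux m).length ≤ m := binAux_length_le m hpos
    have hbpos : 1 ≤ (binAux m).length := binAux_length_pos m hpos
    rw [if_neg (by omega : ¬(binAux m).length = 0), if_neg (by omega : ¬l.length = 0)]
    by_cases h3 : 3 ≤ m
    · exact Prod.Lex.left _ _ (by have := binAux_length_lt m h3; omega)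
    · interval_cases m
      · -- m = 1 : binAux 1 = ['1'] has length 1 < l.length
        exact Prod.Lex.left _ _ (by rw [binAux_one] at hble hbpos ⊢; simp; omega)
      · -- m = 2 : binAux 2 = ['1','0']
        rcases (by omega : l.length = 2 ∨ 3 ≤ l.length) with h | h
        · rw [h, binAux_two]
          have e1 : (['1', '0'] : List Char).length = 2 := rfl
          have e2 : (['1', '0'] : List Char).countP (fun c => !(c == '0')) = 1 := rfl
          rw [e1, e2]
          exact Prod.Lex.right _ (by omega)
        · rw [binAux_two]
          exact Prod.Lex.left _ _
            (by have e1 : (['1', '0'] : List Char).length = 2 := rfl; omega)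

def solution (s : String) : List Int := loopA s.toList 0 0

-- ===== PORT B =====
-- _pop: `c = 0; while n: c += n & 1; n >>= 1`
def popB (n : Nat) : Nat :=
  if n ≠ 0 then (n &&& 1) + popB (n >>> 1) else 0
termination_by n
decreasing_by
  have : n >>> 1 = n / 2 := Nat.shiftRight_one n
  omega

-- one-step unfolding of popB on a positive argument
theorem popB_succ (n : Nat) (h : 1 ≤ n) : popB n = n % 2 + popB (n / 2) := by
  conv_lhs => rw [popB]
  rw [if_pos (by omega : n ≠ 0), Nat.and_one_is_mod, Nat.shiftRight_one]

theorem popB_le (n : Nat) : popB n ≤ n := by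
  induction n using Nat.strong_induction_on with
  | _ n ih =>
    by_cases h : n = 0
    · subst h; rw [popB]; simp
    · rw [popB_succ n (by omega)]
      have := ih (n / 2) (by omega)
      omega

theorem popB_lt (n : Nat) (h : 2 ≤ n) : popB n < n := by
  rw [popB_succ n (by omega)]
  have := popB_le (n / 2)
  omega

-- `while n > 1: play += 1; count += n.bit_length() - _pop(n); n = _pop(n)`
-- (n.bit_length() ported as PySem.Int.bitLength; exact for n ≥ 0)
def loopB (n : Nat) (play count : Int) : List Int :=
  if 1 < n then
    loopB (popB n) (play + 1) (count + (PySem.Int.bitLength (n : Int) - (popB n : Int)))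
  else [play, count]
termination_by n
decreasing_by exact popB_lt n (by omega)

def solution_alt (s : String) : List Int :=
  if s.toList.length = 1 then [0, 0]
  else
    -- zeros = s.count('0'); n = len(s) - zeros (always ≥ 0, so Nat subtraction is exact)
    loopB (s.toList.length - s.toList.count '0') 1 (s.toList.count '0' : Int)

-- ===== PRECONDITION & SPEC =====
def Spec_solution (s : String) (out : List Int) : Prop := out = solution_alt s
instance (s : String) (out : List Int) : Decidable (Spec_solution s out) := by unfold Spec_solution; infer_instance

-- ===== CLAIM (what is proved, stated in full; the proofs are below) =====
def Claim_equal_solution : Prop := ∀ (s : String), Dom_solution s → Spec_solution s (solution s)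

-- ===== LEMMAS AND PROOFS =====

-- the ones count of a binary rendering, one halving step
theorem binAux_countP_succ (n : Nat) (h : 1 ≤ n) :
    (binAux n).countP (fun c => !(c == '0')) =
      n % 2 + (binAux (n/2)).countP (fun c => !(c == '0')) := by
  obtain ⟨m, rfl⟩ : ∃ m, n = m + 1 := ⟨n - 1, by omega⟩
  rw [binAux_succ, List.countP_append, List.countP_singleton]
  by_cases h2 : (m+1) % 2 = 1
  · simp [h2]; omega
  · have h0 : (m+1) % 2 = 0 := by omega
    simp [h0]


-- zeros and non-zeros partition any char list
theorem count0_partition (l : List Char) :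
    l.count '0' + l.countP (fun c => !(c == '0')) = l.length := by
  induction l with
  | nil => rfl
  | cons c t ih =>
    by_cases h : c == '0' <;>
      simp only [List.count_cons, List.countP_cons, h, if_pos, Bool.not_true,
        Bool.not_false, List.length_cons] <;> simp [h] at * <;> omega

-- the non-'0' count of binAux n is the popcount of n
theorem binAux_countP_eq_popB (n : Nat) :
    (binAux n).countP (fun c => !(c == '0')) = popB n := by
  induction n using Nat.strong_induction_on with
  | _ n ih =>
    rcases Nat.eq_zero_or_pos n with rfl | hp
    · rw [popB]; simp [binAux]
    · rw [binAux_countP_succ n hp, ih (n/2) (by omega), popB_succ n hp]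

-- the length of binAux n is Python's n.bit_length()
theorem binAux_length_eq_bitLength (n : Nat) :
    (binAux n).length = PySem.Int.bitLength (n : Int) := by
  induction n using Nat.strong_induction_on with
  | _ n ih =>
    rcases Nat.eq_zero_or_pos n with rfl | hp
    · simp [binAux]
    · rw [binAux_length_succ n hp, PySem.Int.bitLength_natCast (m := n) hp, ih (n/2) (by omega)]

-- the central correspondence: A's loop on bin(n)[2:] equals B's integer loop on n
theorem key (n : Nat) : ∀ play count, loopA (pyBin n) play count = loopB n play count := by
  induction n using Nat.strong_induction_on with
  | _ n ih =>
    intro play count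
    match n with
    | 0 => rw [loopA, loopB]; simp [pyBin]
    | 1 => rw [loopA, loopB]; simp [pyBin, binAux_one]
    | m+2 =>
      have hp : 1 ≤ m + 2 := by omega
      have hlen2 : 2 ≤ (binAux (m+2)).length := by
        rw [binAux_length_succ _ hp]
        have := binAux_length_pos ((m+2)/2) (by omega)
        omega
      have hpyb : pyBin (m+2) = binAux (m+2) := by simp [pyBin]
      rw [loopA, loopB]
      simp only [hpyb, ne_eq, (by omega : (1:Nat) < m + 2), if_pos, innerA_eq, lengthFilter]
      rw [binAux_countP_eq_popB (m+2)]
      have hcnt : ((binAux (m+2)).count '0' : Int) =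
          PySem.Int.bitLength ((m+2 : Nat) : Int) - (popB (m+2) : Int) := by
        have := count0_partition (binAux (m+2))
        rw [binAux_countP_eq_popB (m+2)] at this
        rw [← binAux_length_eq_bitLength (m+2)]
        omega
      rw [hcnt, ih (popB (m+2)) (popB_lt (m+2) (by omega))]
      rw [if_pos (by omega : ¬(binAux (m+2)).length = 1)]

-- ===== VERDICT (by name: the statement is the Claim_ definition above) =====
theorem solution_spec : Claim_equal_solution := by
  intro s _
  unfold Spec_solution solution solution_alt
  by_cases h : s.toList.length = 1
  · rw [loopA]; simp [h]
  · rw [loopA]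
    simp only [h, ne_eq, not_false_iff, if_pos, if_neg, innerA_eq, lengthFilter, zero_add]
    have hpart := count0_partition s.toList
    have hcp : s.toList.countP (fun c => !(c == '0')) = s.toList.length - s.toList.count '0' := by
      omega
    rw [hcp, key]
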